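-- pv_equiv track=rewrite | github.com/ai4up/eubucco | eubucco/preproc/create_overview.py | get_n_files
-- ===== SOURCE A (Python) =====
-- def get_n_files(path_parts):
--     """creates list of num of files per ending
--     """
--     n_files = []
--     for ending in ['_geom', '_attrib', '_source', '_extra', '_buffer', '_boundary']:
--         paths_ending = [p for p in path_parts if ending in p]
--         if ending == '_attrib':
--             paths_ending = [k for k in paths_ending if '_extra_attrib' not in k]
--             paths_ending = [k for k in paths_ending if '_attrib_source' not in k]
--
--         if not paths_ending:
--             n = 0
--         else:
--             n = len(paths_ending)
--         n_files.append(n)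
--     return n_files
-- ===== SOURCE B (Python) =====
-- def get_n_files(path_parts):
--     """creates list of num of files per ending
--     """
--     g = at = so = ex = bu = bo = 0
--     for p in path_parts:
--         if '_geom' in p:
--             g += 1
--         if '_attrib' in p and '_extra_attrib' not in p and '_attrib_source' not in p:
--             at += 1
--         if '_source' in p:
--             so += 1
--         if '_extra' in p:
--             ex += 1
--         if '_buffer' in p:
--             bu += 1
--         if '_boundary' in p:
--             bo += 1
--     return [g, at, so, ex, bu, bo]
-- ===== Notes on version B (the rewrite author's own statement) =====
-- stated objective: alternative
-- what changed: B replaces A's six separate filter passes (one list comprehension per ending plus extra attrib re-filters) with a single pass over path_parts that maintains six counters and returns them in the fixed order.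
import Mathlib
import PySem

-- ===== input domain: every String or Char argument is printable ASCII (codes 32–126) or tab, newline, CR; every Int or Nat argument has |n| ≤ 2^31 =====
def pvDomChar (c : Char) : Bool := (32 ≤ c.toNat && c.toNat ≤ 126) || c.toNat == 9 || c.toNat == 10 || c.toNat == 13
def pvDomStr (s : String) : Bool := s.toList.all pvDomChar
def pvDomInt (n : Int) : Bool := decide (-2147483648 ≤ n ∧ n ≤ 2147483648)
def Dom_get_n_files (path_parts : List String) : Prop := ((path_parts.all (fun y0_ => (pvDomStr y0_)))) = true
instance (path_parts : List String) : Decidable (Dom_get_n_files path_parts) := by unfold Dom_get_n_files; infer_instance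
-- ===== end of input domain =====

-- B replaces A's six filter passes with a single pass maintaining six counters (objective: alternative).


-- ===== PORT A =====
def get_n_files (path_parts : List String) : List Int :=
  (["_geom", "_attrib", "_source", "_extra", "_buffer", "_boundary"]).foldl
    (fun (n_files : List Int) ending =>
      let paths_ending := path_parts.filter (fun p => PySem.Str.isIn ending p)
      let paths_ending :=
        if ending == "_attrib" then
          let paths_ending := paths_ending.filter (fun k => !PySem.Str.isIn "_extra_attrib" k)
          paths_ending.filter (fun k => !PySem.Str.isIn "_attrib_source" k)
        else paths_ending
      let n : Int := if paths_ending.isEmpty then 0 else (paths_ending.length : Int)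
      n_files ++ [n]) []

-- ===== PORT B =====
def altStep (st : Int × Int × Int × Int × Int × Int) (p : String) :
    Int × Int × Int × Int × Int × Int :=
  let (g, at_, so, ex, bu, bo) := st
  let g := if PySem.Str.isIn "_geom" p then g + 1 else g
  let at_ := if PySem.Str.isIn "_attrib" p && !PySem.Str.isIn "_extra_attrib" p && !PySem.Str.isIn "_attrib_source" p then at_ + 1 else at_
  let so := if PySem.Str.isIn "_source" p then so + 1 else so
  let ex := if PySem.Str.isIn "_extra" p then ex + 1 else ex
  let bu := if PySem.Str.isIn "_buffer" p then bu + 1 else bu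
  let bo := if PySem.Str.isIn "_boundary" p then bo + 1 else bo
  (g, at_, so, ex, bu, bo)

def get_n_files_alt (path_parts : List String) : List Int :=
  let st := path_parts.foldl altStep (0, 0, 0, 0, 0, 0)
  [st.1, st.2.1, st.2.2.1, st.2.2.2.1, st.2.2.2.2.1, st.2.2.2.2.2]

-- ===== PRECONDITION & SPEC =====
def Spec_get_n_files (path_parts : List String) (out : List Int) : Prop := out = get_n_files_alt path_parts
instance (path_parts : List String) (out : List Int) : Decidable (Spec_get_n_files path_parts out) := by unfold Spec_get_n_files; infer_instance

-- ===== CLAIM (what is proved, stated in full; the proofs are below) =====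
def Claim_equal_get_n_files : Prop := ∀ (path_parts : List String), Dom_get_n_files path_parts → Spec_get_n_files path_parts (get_n_files path_parts)


-- ===== LEMMAS AND PROOFS =====
theorem altStep_fold (l : List String) (g a so e b bo : Int) :
    l.foldl altStep (g, a, so, e, b, bo) =
      (g + (l.countP (fun p => PySem.Str.isIn "_geom" p) : Int),
       a + (l.countP (fun p => PySem.Str.isIn "_attrib" p && !PySem.Str.isIn "_extra_attrib" p && !PySem.Str.isIn "_attrib_source" p) : Int),
       so + (l.countP (fun p => PySem.Str.isIn "_source" p) : Int),
       e + (l.countP (fun p => PySem.Str.isIn "_extra" p) : Int),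
       b + (l.countP (fun p => PySem.Str.isIn "_buffer" p) : Int),
       bo + (l.countP (fun p => PySem.Str.isIn "_boundary" p) : Int)) := by
  induction l generalizing g a so e b bo with
  | nil => simp
  | cons h t ih =>
    simp only [List.foldl_cons, altStep, List.countP_cons]
    rw [ih]
    split_ifs <;> simp only [Prod.mk.injEq] <;> push_cast <;> omega

theorem ite_isEmpty (l : List String) :
    (if l.isEmpty then (0 : Int) else (l.length : Int)) = (l.length : Int) := by
  split_ifs with h
  · simp [List.isEmpty_iff.mp h]
  · rfl


-- ===== VERDICT (by name: the statement is the Claim_ definition above) =====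
theorem get_n_files_spec : Claim_equal_get_n_files := by
  intro path_parts _
  unfold Spec_get_n_files get_n_files get_n_files_alt
  rw [altStep_fold]
  simp only [List.foldl_cons, List.foldl_nil, beq_iff_eq, List.nil_append,
    List.cons_append, String.reduceEq, reduceIte, ite_isEmpty, ← List.countP_eq_length_filter,
    List.filter_filter, List.cons.injEq, and_true, zero_add]
  refine ⟨trivial, ?_⟩
  congr 1
  exact List.countP_congr (fun x _ => by
    cases hA : PySem.Str.isIn "_attrib" x <;>
    cases hE : PySem.Str.isIn "_extra_attrib" x <;>
    cases hS : PySem.Str.isIn "_attrib_source" x <;> simp_all)
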